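-- pv_equiv track=rewrite | github.com/tarikkisija14/NBA-score-predictor | AI Model/scripts/CalculateWinStreak.py | calc_streak
-- ===== SOURCE A (Python) =====
-- def calc_streak(wins):
--     streak = 0
--     streaks = []
--     for w in wins:
--         if w == 1:
--             streak += 1
--         else:
--             streak = 0
--         streaks.append(streak)
--     return streaks
-- ===== SOURCE B (Python) =====
-- def calc_streak(wins):
--     # Run-by-run: split the input into maximal runs keyed on (w == 1);
--     # a True run of length k emits 1..k, a False run emits k zeros.
--     out = []
--     n = len(wins)
--     i = 0
--     while i < n:
--         key = (wins[i] == 1)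
--         j = i + 1
--         while j < n and (wins[j] == 1) == key:
--             j += 1
--         k = j - i
--         if key:
--             out.extend(range(1, k + 1))
--         else:
--             out.extend([0] * k)
--         i = j
--     return out
-- ===== Notes on version B (the rewrite author's own statement) =====
-- stated objective: alternative
-- what changed: B builds the answer run-by-run: it splits the input into maximal runs keyed on (w == 1) and emits 1..k for a win run and k zeros for a non-win run, instead of A's element-by-element counter.
import Mathlib
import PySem

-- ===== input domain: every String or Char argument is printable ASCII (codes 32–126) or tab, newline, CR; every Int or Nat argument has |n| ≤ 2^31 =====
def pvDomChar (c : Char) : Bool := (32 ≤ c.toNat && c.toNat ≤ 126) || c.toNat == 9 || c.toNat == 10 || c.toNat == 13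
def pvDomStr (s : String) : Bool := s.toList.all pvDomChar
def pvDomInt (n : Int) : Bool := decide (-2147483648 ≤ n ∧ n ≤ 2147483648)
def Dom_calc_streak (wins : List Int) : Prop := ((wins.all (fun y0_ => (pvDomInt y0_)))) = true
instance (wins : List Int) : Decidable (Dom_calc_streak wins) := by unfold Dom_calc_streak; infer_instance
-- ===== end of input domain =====

-- ===== PORT A =====
-- A: one pass keeping a running streak counter, appending it per element.
def calc_streak (wins : List Int) : List Int :=
  (wins.foldl
    (fun (st : Int × List Int) w =>
      let streak := if w == 1 then st.1 + 1 else (0 : Int)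
      (streak, st.2 ++ [streak]))
    ((0 : Int), ([] : List Int))).2

-- ===== PORT B =====
-- B: builds the result run-by-run (maximal runs keyed on w == 1):
-- a win run of length k contributes [1..k], a non-win run contributes k zeros.
def runsGo : List Int → List Int
  | [] => []
  | w :: rest =>
    let p := fun x => ((x == (1 : Int)) == (w == 1))
    let k := (rest.takeWhile p).length + 1
    (if w == 1 then (List.range k).map (fun (i : Nat) => ((i : Int) + 1))
     else List.replicate k (0 : Int))
      ++ runsGo (rest.dropWhile p)
termination_by l => l.length
decreasing_by
  simp only [List.length_cons]
  exact Nat.lt_succ_of_le (List.length_dropWhile_le _ _)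

def calc_streak_alt (wins : List Int) : List Int := runsGo wins

-- ===== PRECONDITION & SPEC =====
def Spec_calc_streak (wins : List Int) (out : List Int) : Prop := out = calc_streak_alt wins
instance (wins : List Int) (out : List Int) : Decidable (Spec_calc_streak wins out) := by unfold Spec_calc_streak; infer_instance

-- ===== CLAIM (what is proved, stated in full; the proofs are below) =====
def Claim_equal_calc_streak : Prop := ∀ (wins : List Int), Dom_calc_streak wins → Spec_calc_streak wins (calc_streak wins)

-- ===== LEMMAS AND PROOFS =====

-- reference streak function: the per-element recursion both ports compute
def fstreak (s : Int) : List Int → List Int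
  | [] => []
  | w :: rest =>
    let s' := if w == 1 then s + 1 else 0
    s' :: fstreak s' rest

lemma calc_streak_foldl (l : List Int) :
    ∀ (s : Int) (acc : List Int),
      (l.foldl
        (fun (st : Int × List Int) w =>
          let streak := if w == 1 then st.1 + 1 else (0 : Int)
          (streak, st.2 ++ [streak]))
        (s, acc)).2 = acc ++ fstreak s l := by
  induction l with
  | nil => intro s acc; simp [fstreak]
  | cons w rest ih =>
    intro s acc
    simp only [List.foldl_cons, fstreak]
    rw [ih]
    simp

lemma calc_streak_eq_f (wins : List Int) : calc_streak wins = fstreak 0 wins := by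
  unfold calc_streak
  rw [calc_streak_foldl]
  simp

lemma fstreak_ones (l1 : List Int) :
    ∀ (s : Int) (tail : List Int), (∀ y ∈ l1, y = 1) →
      fstreak s (l1 ++ tail) =
        (List.range l1.length).map (fun (i : Nat) => s + (i : Int) + 1) ++ fstreak (s + l1.length) tail := by
  induction l1 with
  | nil => intro s tail _; simp
  | cons x l1 ih =>
    intro s tail h
    have hx : x = 1 := h x (by simp)
    subst hx
    simp only [List.cons_append, fstreak, if_pos (by decide : ((1:Int) == 1) = true)]
    rw [ih (s + 1) tail (fun y hy => h y (by simp [hy]))]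
    rw [List.length_cons, List.range_succ_eq_map, List.map_cons, List.map_map, List.cons_append]
    congr 1
    · push_cast; ring
    congr 1
    · apply List.map_congr_left; intro i _; simp only [Function.comp]; push_cast; ring
    · congr 1; push_cast; ring

lemma fstreak_nonones (l1 : List Int) :
    ∀ (tail : List Int), (∀ y ∈ l1, y ≠ 1) →
      fstreak 0 (l1 ++ tail) = List.replicate l1.length (0 : Int) ++ fstreak 0 tail := by
  induction l1 with
  | nil => intro tail _; simp
  | cons x l1 ih =>
    intro tail h
    have hx : x ≠ 1 := h x (by simp)
    simp only [List.cons_append, fstreak, if_neg (by simp [hx] : ¬ ((x == (1:Int)) = true))]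
    rw [ih tail (fun y hy => h y (by simp [hy]))]
    simp [List.replicate_succ]

lemma fstreak_reset (s : Int) (tail : List Int)
    (h : tail = [] ∨ ∃ t r, tail = t :: r ∧ t ≠ 1) :
    fstreak s tail = fstreak 0 tail := by
  rcases h with h | ⟨t, r, rfl, ht⟩
  · subst h; simp [fstreak]
  · simp [fstreak, ht]

lemma f_eq_runs : ∀ (n : Nat) (l : List Int), l.length ≤ n → fstreak 0 l = runsGo l := by
  intro n
  induction n with
  | zero =>
    intro l hl
    have : l = [] := List.length_eq_zero_iff.mp (Nat.le_zero.mp hl)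
    subst this; simp [fstreak, runsGo]
  | succ n ih =>
    intro l hl
    match l with
    | [] => simp [fstreak, runsGo]
    | w :: rest =>
      rw [runsGo]
      set p := fun x => ((x == (1 : Int)) == (w == 1)) with hp
      have hsplit : rest = rest.takeWhile p ++ rest.dropWhile p := (List.takeWhile_append_dropWhile).symm
      have htail : (rest.dropWhile p).length ≤ n := by
        have := List.length_dropWhile_le p rest
        simp only [List.length_cons] at hl; omega
      have htl : fstreak 0 (rest.dropWhile p) = runsGo (rest.dropWhile p) := ih _ htail
      by_cases hw : w = 1
      · subst hw
        have hpone : ∀ y ∈ rest.takeWhile p, y = 1 := by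
          intro y hy
          have := List.mem_takeWhile_imp hy
          simpa [hp] using this
        have hall : ∀ y ∈ (1 : Int) :: rest.takeWhile p, y = 1 := by
          intro y hy; rcases List.mem_cons.mp hy with h | h
          · exact h
          · exact hpone y h
        have hreset : fstreak (0 + (((1:Int) :: rest.takeWhile p).length : Int)) (rest.dropWhile p)
            = fstreak 0 (rest.dropWhile p) := by
          apply fstreak_reset
          cases hdr : rest.dropWhile p with
          | nil => left; rfl
          | cons t r =>
            right; refine ⟨t, r, rfl, ?_⟩
            have := List.head?_dropWhile_not p rest
            rw [hdr] at this
            simp [hp] at this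
            exact this
        have : fstreak 0 ((1:Int) :: rest) =
            (List.range ((1:Int) :: rest.takeWhile p).length).map (fun (i : Nat) => 0 + (i : Int) + 1)
              ++ fstreak (0 + (((1:Int) :: rest.takeWhile p).length : Int)) (rest.dropWhile p) := by
          conv_lhs => rw [show (1:Int) :: rest = ((1:Int) :: rest.takeWhile p) ++ rest.dropWhile p by
            simp [← hsplit]]
          exact fstreak_ones _ _ _ hall
        rw [this, hreset, htl]
        simp only [if_pos (by decide : ((1:Int) == 1) = true), List.length_cons]
        congr 1
        apply List.map_congr_left; intro i _; ring
      · have hpnone : ∀ y ∈ w :: rest.takeWhile p, y ≠ 1 := by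
          intro y hy; rcases List.mem_cons.mp hy with h | h
          · subst h; exact hw
          · have := List.mem_takeWhile_imp h
            simp [hp, hw] at this
            exact this
        have : fstreak 0 (w :: rest) = List.replicate (w :: rest.takeWhile p).length (0:Int)
            ++ fstreak 0 (rest.dropWhile p) := by
          conv_lhs => rw [show w :: rest = (w :: rest.takeWhile p) ++ rest.dropWhile p by
            simp [← hsplit]]
          exact fstreak_nonones _ _ hpnone
        rw [this, htl]
        have hb : (w == (1:Int)) = false := by simp [hw]
        rw [hb]
        simp

-- ===== VERDICT (by name: the statement is the Claim_ definition above) =====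
theorem calc_streak_spec : Claim_equal_calc_streak := by
  intro wins _
  unfold Spec_calc_streak calc_streak_alt
  rw [calc_streak_eq_f]
  exact f_eq_runs wins.length wins (le_refl _)
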